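-- pv_equiv track=rewrite | github.com/BYVoid/OpenCC | test/golden/golden_diff.py | common_suffix
-- ===== SOURCE A (Python) =====
-- def common_suffix(strings: list[str], prefix_len: int) -> str:
--     if not strings:
--         return ""
--     suffix = strings[0][prefix_len:]
--     for text in strings[1:]:
--         candidate = text[prefix_len:]
--         limit = min(len(suffix), len(candidate))
--         index = 0
--         while index < limit and suffix[-(index + 1)] == candidate[-(index + 1)]:
--             index += 1
--         suffix = suffix[len(suffix) - index :] if index else ""
--         if not suffix:
--             break
--     return suffix
-- ===== SOURCE B (Python) =====
-- def common_suffix(strings: list[str], prefix_len: int) -> str: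
--     # Columnar scan: strip+reverse every string once, then walk index 0..min-length
--     # while all strings agree; reverse the agreed prefix back into a suffix.
--     if not strings:
--         return ""
--     rev = [s[prefix_len:][::-1] for s in strings]
--     first = rev[0]
--     n = len(first)
--     for r in rev:
--         n = min(n, len(r))
--     i = 0
--     while i < n and all(r[i] == first[i] for r in rev):
--         i += 1
--     return first[:i][::-1]
-- ===== Notes on version B (the rewrite author's own statement) =====
-- stated objective: alternative
-- what changed: Replaces A's pairwise fold that repeatedly re-slices a shrinking running suffix with a single columnar scan: strip and reverse every string once, advance one index across all strings simultaneously until the first disagreement, and reverse the agreed prefix.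
import Mathlib
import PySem

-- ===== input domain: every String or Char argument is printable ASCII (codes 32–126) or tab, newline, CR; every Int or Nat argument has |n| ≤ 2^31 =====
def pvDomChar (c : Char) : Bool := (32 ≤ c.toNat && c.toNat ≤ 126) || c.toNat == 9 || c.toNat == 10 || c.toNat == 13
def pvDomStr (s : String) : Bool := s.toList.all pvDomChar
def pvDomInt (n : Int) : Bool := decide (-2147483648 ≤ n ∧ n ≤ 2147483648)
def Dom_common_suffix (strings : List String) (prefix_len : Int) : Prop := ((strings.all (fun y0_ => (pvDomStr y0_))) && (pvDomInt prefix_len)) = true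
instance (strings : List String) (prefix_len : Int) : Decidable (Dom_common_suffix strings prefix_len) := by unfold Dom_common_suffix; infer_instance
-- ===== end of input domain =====

-- B replaces A's pairwise running-suffix fold with a single columnar scan over the
-- reversed stripped strings (alternative decomposition; same asymptotic cost).

-- ===== PORT A =====
-- while index < limit and suffix[-(index+1)] == candidate[-(index+1)]: index += 1
def pvAWhile (suffix candidate : List Char) (limit : Nat) : Nat → Nat → Nat
  | 0, index => index
  | fuel + 1, index =>
    if index < limit ∧
        PySem.List.pyGet? suffix (-((index : Int) + 1)) = PySem.List.pyGet? candidate (-((index : Int) + 1)) then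
      pvAWhile suffix candidate limit fuel (index + 1)
    else index

-- the 'for text in strings[1:]' loop with its 'if not suffix: break'
def pvALoop (prefix_len : Int) : List String → List Char → List Char
  | [], suffix => suffix
  | text :: rest, suffix =>
    let candidate := PySem.Chars.slice text.toList (some prefix_len) none
    let limit := min suffix.length candidate.length
    let index := pvAWhile suffix candidate limit limit 0
    let suffix' := if index ≠ 0 then PySem.Chars.slice suffix (some ((suffix.length : Int) - (index : Int))) none else []
    if suffix' = [] then suffix' else pvALoop prefix_len rest suffix'

def common_suffix (strings : List String) (prefix_len : Int) : String :=
  match strings with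
  | [] => ""
  | s0 :: rest => String.ofList (pvALoop prefix_len rest (PySem.Chars.slice s0.toList (some prefix_len) none))

-- ===== PORT B =====
-- while i < n and all(r[i] == first[i] for r in rev): i += 1
def pvBWhile (rev : List (List Char)) (first : List Char) (n : Nat) : Nat → Nat → Nat
  | 0, i => i
  | fuel + 1, i =>
    if i < n ∧ rev.all (fun r => r[i]? = first[i]?) then
      pvBWhile rev first n fuel (i + 1)
    else i

def common_suffix_alt (strings : List String) (prefix_len : Int) : String :=
  match strings with
  | [] => ""
  | s0 :: rest =>
    let rev := (s0 :: rest).map (fun s => (PySem.Chars.slice s.toList (some prefix_len) none).reverse)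
    let first := (PySem.Chars.slice s0.toList (some prefix_len) none).reverse
    let n := rev.foldl (fun m r => min m r.length) first.length
    let i := pvBWhile rev first n n 0
    String.ofList ((first.take i).reverse)

-- ===== PRECONDITION & SPEC =====
def Spec_common_suffix (strings : List String) (prefix_len : Int) (out : String) : Prop := out = common_suffix_alt strings prefix_len
instance (strings : List String) (prefix_len : Int) (out : String) : Decidable (Spec_common_suffix strings prefix_len out) := by unfold Spec_common_suffix; infer_instance

-- ===== CLAIM (what is proved, stated in full; the proofs are below) =====
def Claim_equal_common_suffix : Prop := ∀ (strings : List String) (prefix_len : Int), Dom_common_suffix strings prefix_len → Spec_common_suffix strings prefix_len (common_suffix strings prefix_len)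

-- ===== LEMMAS AND PROOFS =====

-- longest common prefix of two char lists
def pvCp : List Char → List Char → List Char
  | a :: x, b :: y => if a = b then a :: pvCp x y else []
  | [], _ => []
  | _ :: _, [] => []

-- columnar common prefix of a head list against a list of further lists
def pvCol : List Char → List (List Char) → List Char
  | [], _ => []
  | a :: x, rs => if rs.all (fun r => r.head? = some a) then a :: pvCol x (rs.map List.tail) else []

theorem pvCp_nil_left (y : List Char) : pvCp [] y = [] := by cases y <;> rfl

theorem pvCp_nil_right (x : List Char) : pvCp x [] = [] := by cases x <;> rfl

theorem pvCp_length_le_left : ∀ (x y : List Char), (pvCp x y).length ≤ x.length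
  | [], y => by simp [pvCp_nil_left]
  | _ :: _, [] => by simp [pvCp_nil_right]
  | a :: x, b :: y => by
    by_cases h : a = b
    · simpa [pvCp, h] using pvCp_length_le_left x y
    · simp [pvCp, h]

theorem pvCp_take : ∀ (x y : List Char), x.take (pvCp x y).length = pvCp x y
  | [], y => by simp [pvCp_nil_left]
  | _ :: _, [] => by simp [pvCp_nil_right]
  | a :: x, b :: y => by
    by_cases h : a = b
    · simp [pvCp, h, pvCp_take x y]
    · simp [pvCp, h]

theorem pvCp_drop_min (s c : List Char) :
    pvCp (s.reverse.drop (min s.length c.length)) (c.reverse.drop (min s.length c.length)) = [] := by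
  rcases Nat.le_total s.length c.length with h | h
  · have h1 : s.reverse.drop (min s.length c.length) = [] :=
      List.drop_eq_nil_of_le (by simp; omega)
    rw [h1, pvCp_nil_left]
  · have h1 : c.reverse.drop (min s.length c.length) = [] :=
      List.drop_eq_nil_of_le (by simp; omega)
    rw [h1, pvCp_nil_right]

-- A's inner while loop counts the common prefix length of the reversed lists
theorem pvAWhile_spec (s c : List Char) : ∀ (fuel i : Nat),
    min s.length c.length - i ≤ fuel → i ≤ min s.length c.length →
    pvAWhile s c (min s.length c.length) fuel i
      = i + (pvCp (s.reverse.drop i) (c.reverse.drop i)).length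
  | 0, i, hfuel, hi => by
    have hi' : i = min s.length c.length := by omega
    subst hi'
    rw [pvCp_drop_min]
    simp [pvAWhile]
  | fuel + 1, i, hfuel, hi => by
    by_cases hlt : i < min s.length c.length
    · have hs : i < s.length := by omega
      have hc : i < c.length := by omega
      have hgs : PySem.List.pyGet? s (-((i : Int) + 1)) = s.reverse[i]? := by
        have h1 := PySem.List.pyGet?_neg_natCast s (i + 1) (by omega) (by omega)
        have h2 : (-((i : Int) + 1)) = -(((i + 1 : Nat) : Int)) := by push_cast; ring
        rw [h2, h1, List.getElem?_reverse hs]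
        congr 1
        omega
      have hgc : PySem.List.pyGet? c (-((i : Int) + 1)) = c.reverse[i]? := by
        have h1 := PySem.List.pyGet?_neg_natCast c (i + 1) (by omega) (by omega)
        have h2 : (-((i : Int) + 1)) = -(((i + 1 : Nat) : Int)) := by push_cast; ring
        rw [h2, h1, List.getElem?_reverse hc]
        congr 1
        omega
      have hsi : i < s.reverse.length := by simp; omega
      have hci : i < c.reverse.length := by simp; omega
      have hds : s.reverse.drop i = s.reverse[i] :: s.reverse.drop (i + 1) :=
        List.drop_eq_getElem_cons hsi
      have hdc : c.reverse.drop i = c.reverse[i] :: c.reverse.drop (i + 1) :=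
        List.drop_eq_getElem_cons hci
      by_cases hab : s.reverse[i] = c.reverse[i]
      · have hcond : i < min s.length c.length ∧
            PySem.List.pyGet? s (-((i : Int) + 1)) = PySem.List.pyGet? c (-((i : Int) + 1)) := by
          refine ⟨hlt, ?_⟩
          rw [hgs, hgc, List.getElem?_eq_getElem hsi, List.getElem?_eq_getElem hci, hab]
        rw [pvAWhile, if_pos hcond,
          pvAWhile_spec s c fuel (i + 1) (by omega) (by omega), hds, hdc]
        simp [pvCp, hab]
        omega
      · have hcond : ¬ (i < min s.length c.length ∧
            PySem.List.pyGet? s (-((i : Int) + 1)) = PySem.List.pyGet? c (-((i : Int) + 1))) := by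
          rintro ⟨-, h⟩
          rw [hgs, hgc, List.getElem?_eq_getElem hsi, List.getElem?_eq_getElem hci] at h
          exact hab (by simpa using h)
        rw [pvAWhile, if_neg hcond, hds, hdc]
        simp only [List.getElem_reverse] at hab
        simp [pvCp, hab]
    · have hi' : i = min s.length c.length := by omega
      subst hi'
      rw [pvAWhile, if_neg (by rintro ⟨h, -⟩; omega), pvCp_drop_min]
      simp

theorem pvFoldl_cp_nil : ∀ (L : List (List Char)), List.foldl pvCp [] L = []
  | [] => rfl
  | y :: L => by rw [List.foldl_cons, pvCp_nil_left, pvFoldl_cp_nil L]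

-- A's loop is the fold of pvCp over the reversed stripped strings
theorem pvALoop_spec (prefix_len : Int) : ∀ (rest : List String) (suffix : List Char),
    pvALoop prefix_len rest suffix
      = (List.foldl pvCp suffix.reverse
          (rest.map (fun t => (PySem.Chars.slice t.toList (some prefix_len) none).reverse))).reverse
  | [], suffix => by simp [pvALoop]
  | text :: rest, suffix => by
    rw [List.map_cons, List.foldl_cons]
    simp only [pvALoop, PySem.Chars.slice_eq_listSlice]
    set cand := PySem.List.slice text.toList (some prefix_len) none with hcand
    have hk : pvAWhile suffix cand (min suffix.length cand.length)
        (min suffix.length cand.length) 0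
        = (pvCp suffix.reverse cand.reverse).length := by
      simpa using pvAWhile_spec suffix cand (min suffix.length cand.length) 0
        (by omega) (by omega)
    rw [hk]
    have hkle : (pvCp suffix.reverse cand.reverse).length ≤ suffix.length := by
      simpa using pvCp_length_le_left suffix.reverse cand.reverse
    have hS' :
        (if (pvCp suffix.reverse cand.reverse).length ≠ 0 then
            PySem.List.slice suffix
              (some ((suffix.length : Int) - ((pvCp suffix.reverse cand.reverse).length : Int))) none
          else [])
        = (pvCp suffix.reverse cand.reverse).reverse := by
      by_cases hk0 : (pvCp suffix.reverse cand.reverse).length = 0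
      · rw [if_neg (by simp [hk0])]
        rw [List.eq_nil_of_length_eq_zero hk0]
        simp
      · rw [if_pos hk0]
        have hcast : ((suffix.length : Int) - ((pvCp suffix.reverse cand.reverse).length : Int))
            = ((suffix.length - (pvCp suffix.reverse cand.reverse).length : Nat) : Int) := by
          omega
        rw [hcast, PySem.List.slice_from_natCast]
        conv_rhs => rw [← pvCp_take suffix.reverse cand.reverse]
        rw [List.reverse_take]
        simp
    rw [hS']
    by_cases hS : (pvCp suffix.reverse cand.reverse).reverse = []
    · rw [if_pos hS, hS]
      have hnil : pvCp suffix.reverse cand.reverse = [] := by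
        simpa using congrArg List.reverse hS
      rw [hnil, pvFoldl_cp_nil]
      simp
    · rw [if_neg hS, pvALoop_spec prefix_len rest _]
      simp only [PySem.Chars.slice_eq_listSlice, List.reverse_reverse]

-- pvCol absorbs its first partner through pvCp
theorem pvCol_cons : ∀ (x y : List Char) (rs : List (List Char)),
    pvCol x (y :: rs) = pvCol (pvCp x y) rs
  | [], y, rs => by rw [pvCp_nil_left]; rfl
  | a :: x, [], rs => by simp [pvCol, pvCp]
  | a :: x, b :: y, rs => by
    by_cases hab : a = b
    · subst hab
      rw [show pvCp (a :: x) (a :: y) = a :: pvCp x y from by simp [pvCp]]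
      conv_lhs => rw [pvCol]
      conv_rhs => rw [pvCol]
      have hc : (((a :: y) :: rs).all (fun r => decide (r.head? = some a)))
          = rs.all (fun r => decide (r.head? = some a)) := by simp
      rw [hc]
      by_cases hall : (rs.all fun r => decide (r.head? = some a)) = true
      · rw [if_pos hall, if_pos hall]
        simp only [List.map_cons, List.tail_cons]
        rw [pvCol_cons x y (rs.map List.tail)]
      · rw [if_neg hall, if_neg hall]
    · have hba : ¬ (b = a) := fun h => hab h.symm
      simp [pvCol, pvCp, hab, hba]

theorem pvCol_nil : ∀ (x : List Char), pvCol x [] = x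
  | [] => rfl
  | a :: x => by simp [pvCol, pvCol_nil x]

theorem pvCol_eq_foldl : ∀ (rs : List (List Char)) (x : List Char),
    pvCol x rs = List.foldl pvCp x rs
  | [], x => by rw [pvCol_nil]; rfl
  | y :: rs, x => by rw [pvCol_cons, List.foldl_cons, pvCol_eq_foldl rs]

theorem pvCol_take : ∀ (x : List Char) (rs : List (List Char)),
    x.take (pvCol x rs).length = pvCol x rs
  | [], rs => by simp [pvCol]
  | a :: x, rs => by
    by_cases h : rs.all (fun r => decide (r.head? = some a)) = true
    · simp [pvCol, h, pvCol_take x (rs.map List.tail)]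
    · simp [pvCol, h]

-- facts about the foldl-min length bound
theorem pvFoldlMin_le : ∀ (l : List Nat) (m : Nat), l.foldl min m ≤ m
  | [], m => le_refl m
  | a :: l, m => by
    rw [List.foldl_cons]
    exact le_trans (pvFoldlMin_le l (min m a)) (min_le_left m a)

theorem pvFoldlMin_le_mem : ∀ (l : List Nat) (m x : Nat), x ∈ l → l.foldl min m ≤ x
  | a :: l, m, x, hx => by
    rw [List.foldl_cons]
    rcases List.mem_cons.mp hx with rfl | hx
    · exact le_trans (pvFoldlMin_le l (min m x)) (min_le_right m x)
    · exact pvFoldlMin_le_mem l (min m a) x hx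

theorem pvFoldlMin_eq : ∀ (l : List Nat) (m : Nat), l.foldl min m = m ∨ l.foldl min m ∈ l
  | [], m => Or.inl rfl
  | a :: l, m => by
    rw [List.foldl_cons]
    rcases pvFoldlMin_eq l (min m a) with h | h
    · rcases min_choice m a with h' | h'
      · exact Or.inl (h.trans h')
      · exact Or.inr (by rw [h, h']; exact List.mem_cons_self)
    · exact Or.inr (List.mem_cons_of_mem a h)

theorem pvCol_drop_nil (first : List Char) (others : List (List Char)) (n : Nat)
    (hex : first.length = n ∨ ∃ r ∈ others, r.length = n) :
    pvCol (first.drop n) (others.map (fun r => r.drop n)) = [] := by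
  cases hd : first.drop n with
  | nil => rfl
  | cons a x =>
    have hfl : n < first.length := by
      by_contra h
      rw [List.drop_eq_nil_of_le (by omega)] at hd
      simp at hd
    rcases hex with h | ⟨r, hr, hrn⟩
    · omega
    · simp only [pvCol]
      rw [if_neg]
      intro hall
      rw [List.all_eq_true] at hall
      have hmem : r.drop n ∈ others.map (fun r => r.drop n) := List.mem_map_of_mem hr
      have := hall _ hmem
      rw [List.drop_eq_nil_of_le (by omega)] at this
      simp at this

-- B's while loop computes the columnar common prefix length
theorem pvBWhile_spec (first : List Char) (others : List (List Char)) (n : Nat)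
    (hle : ∀ r ∈ first :: others, n ≤ r.length)
    (hex : first.length = n ∨ ∃ r ∈ others, r.length = n) :
    ∀ (fuel i : Nat), n - i ≤ fuel → i ≤ n →
    pvBWhile (first :: others) first n fuel i
      = i + (pvCol (first.drop i) (others.map (fun r => r.drop i))).length
  | 0, i, hfuel, hi => by
    have hi' : i = n := by omega
    rw [hi', pvCol_drop_nil first others n hex]
    simp [pvBWhile]
  | fuel + 1, i, hfuel, hi => by
    by_cases hin : i < n
    · have hif : i < first.length := by
        have := hle first (List.mem_cons_self); omega
      have hdf : first.drop i = first[i] :: first.drop (i + 1) := List.drop_eq_getElem_cons hif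
      by_cases hC : ∀ r ∈ others, r[i]? = some first[i]
      · have hcond : i < n ∧ ((first :: others).all (fun r => decide (r[i]? = first[i]?)) = true) := by
          refine ⟨hin, ?_⟩
          rw [List.all_eq_true]
          intro r hr
          rcases List.mem_cons.mp hr with rfl | hr
          · simp
          · simp [hC r hr, List.getElem?_eq_getElem hif]
        rw [pvBWhile, if_pos hcond,
          pvBWhile_spec first others n hle hex fuel (i + 1) (by omega) (by omega), hdf]
        simp only [pvCol]
        rw [if_pos ?hcol]
        case hcol =>
          rw [List.all_eq_true]
          intro r hr
          rcases List.mem_map.mp hr with ⟨r0, hr0, rfl⟩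
          simp [List.head?_drop, hC r0 hr0]
        have hmm : (others.map (fun r => r.drop i)).map List.tail = others.map (fun r => r.drop (i + 1)) := by
          rw [List.map_map]
          exact List.map_congr_left (fun r _ => by simp [Function.comp, List.tail_drop])
        rw [hmm]
        simp
        omega
      · push_neg at hC
        obtain ⟨r, hr, hne⟩ := hC
        have hcond : ¬ (i < n ∧ ((first :: others).all (fun r => decide (r[i]? = first[i]?)) = true)) := by
          rintro ⟨-, hall⟩
          rw [List.all_eq_true] at hall
          have := hall r (List.mem_cons_of_mem first hr)
          rw [List.getElem?_eq_getElem hif] at this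
          simp at this
          exact hne this
        rw [pvBWhile, if_neg hcond, hdf]
        simp only [pvCol]
        rw [if_neg ?hcol]
        case hcol =>
          intro hall
          rw [List.all_eq_true] at hall
          have := hall _ (List.mem_map_of_mem hr)
          rw [List.head?_drop] at this
          simp at this
          exact hne this
        simp
    · have hi' : i = n := by omega
      rw [hi', pvBWhile, if_neg (by rintro ⟨h, -⟩; omega), pvCol_drop_nil first others n hex]
      simp

-- ===== VERDICT (by name: the statement is the Claim_ definition above) =====
theorem common_suffix_spec : Claim_equal_common_suffix := by
  intro strings prefix_len _
  unfold Spec_common_suffix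
  cases strings with
  | nil => rfl
  | cons s0 rest =>
    simp only [common_suffix, common_suffix_alt, List.map_cons]
    rw [pvALoop_spec]
    set first : List Char := (PySem.Chars.slice s0.toList (some prefix_len) none).reverse with hfirst
    set others : List (List Char) :=
      rest.map (fun s => (PySem.Chars.slice s.toList (some prefix_len) none).reverse) with hothers
    set n : Nat := (first :: others).foldl (fun m r => min m r.length) first.length with hn
    have hnfold : n = ((first :: others).map List.length).foldl min first.length := by
      rw [List.foldl_map]
    have hle : ∀ r ∈ first :: others, n ≤ r.length := by
      intro r hr
      rw [hnfold]
      exact pvFoldlMin_le_mem _ _ _ (List.mem_map_of_mem hr)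
    have hex : first.length = n ∨ ∃ r ∈ others, r.length = n := by
      rcases pvFoldlMin_eq ((first :: others).map List.length) first.length with h | h
      · exact Or.inl (by rw [hnfold, h])
      · rcases List.mem_map.mp h with ⟨r, hr, hlen⟩
        rcases List.mem_cons.mp hr with rfl | hr
        · exact Or.inl (by rw [hnfold]; exact hlen)
        · exact Or.inr ⟨r, hr, by rw [hnfold]; exact hlen⟩
    have hb := pvBWhile_spec first others n hle hex n 0 (by omega) (by omega)
    simp only [List.drop_zero, List.map_id', Nat.zero_add] at hb
    rw [hb, pvCol_take, pvCol_eq_foldl]
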